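-- pv_equiv track=rewrite | github.com/NeKroFR/Maskpy2 | vm_splitter.py | _build_segments_with_transfers
-- ===== SOURCE A (Python) =====
-- def _build_segments_with_transfers(blocks, assignments, n_vms, rng):
--     segments = [[] for _ in range(n_vms)]
--     dispatch_order = []
--     current_vm = assignments.get(0, 0)
--     current_run_blocks = 0
--     for i, block in enumerate(blocks):
--         vm = assignments.get(i, 0)
--         if vm != current_vm:
--             segments[current_vm].append(('VM_YIELD',))
--             dispatch_order.append((current_vm, current_run_blocks))
--             current_run_blocks = 0
--             current_vm = vm
--         for instr in block:
--             segments[vm].append(instr)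
--         current_run_blocks += 1
--     if current_run_blocks > 0:
--         segments[current_vm].append(('VM_YIELD',))
--         dispatch_order.append((current_vm, current_run_blocks))
--     return segments, dispatch_order
-- ===== SOURCE B (Python) =====
-- def _build_segments_with_transfers(blocks, assignments, n_vms, rng):
--     # Phase 1: group consecutive block indices into runs by VM assignment.
--     runs = []  # list of (vm, [block, ...])
--     for i, block in enumerate(blocks):
--         vm = assignments.get(i, 0)
--         if runs and runs[-1][0] == vm:
--             runs[-1][1].append(block)
--         else:
--             runs.append((vm, [block]))
--     # Phase 2: emit each run: its instructions, one yield, one dispatch entry.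
--     segments = [[] for _ in range(n_vms)]
--     dispatch_order = []
--     for vm, run in runs:
--         seg = segments[vm]
--         for block in run:
--             seg.extend(block)
--         seg.append(('VM_YIELD',))
--         dispatch_order.append((vm, len(run)))
--     return segments, dispatch_order
-- ===== Notes on version B (the rewrite author's own statement) =====
-- stated objective: alternative
-- what changed: Replaces the inline transition-detection state machine by an explicit two-phase algorithm: first group consecutive block indices into (vm, run) runs, then emit each run's instructions, yield and dispatch entry in a second pass.
import Mathlib
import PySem

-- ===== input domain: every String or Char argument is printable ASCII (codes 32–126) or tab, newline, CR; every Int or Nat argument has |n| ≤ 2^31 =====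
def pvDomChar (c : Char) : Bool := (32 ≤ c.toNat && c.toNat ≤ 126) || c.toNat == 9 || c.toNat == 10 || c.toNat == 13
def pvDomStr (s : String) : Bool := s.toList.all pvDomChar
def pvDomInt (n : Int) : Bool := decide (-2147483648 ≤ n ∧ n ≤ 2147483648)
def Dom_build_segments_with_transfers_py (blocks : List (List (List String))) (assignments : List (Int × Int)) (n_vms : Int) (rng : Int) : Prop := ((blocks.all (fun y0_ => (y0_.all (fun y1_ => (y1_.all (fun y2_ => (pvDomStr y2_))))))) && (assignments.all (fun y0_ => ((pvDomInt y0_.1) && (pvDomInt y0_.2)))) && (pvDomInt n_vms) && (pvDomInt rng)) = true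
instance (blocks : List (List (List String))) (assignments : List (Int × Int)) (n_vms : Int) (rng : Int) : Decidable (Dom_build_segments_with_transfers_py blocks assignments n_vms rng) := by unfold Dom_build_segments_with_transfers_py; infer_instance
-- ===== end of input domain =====

-- B replaces A's inline transition-detection state machine with a grouping phase (consecutive
-- indices with equal VM assignment) followed by a per-run emission phase (objective: alternative decomposition).

-- ===== PORT A =====
-- assignments.get(i, 0): Python dict lookup with default.
def pvGet (assignments : List (Int × Int)) (i : Int) : Int := PySem.Dict.getD (PySem.Dict.mk assignments) i 0

-- segments[vm].append(...)/extend-by-a-block, Python list indexing with negative-index wraparound;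
-- an out-of-range index raises IndexError in Python (excluded by Pre_), here the guard makes it a no-op.
def pvExtend (segs : List (List (List String))) (vm : Int) (xs : List (List String)) : List (List (List String)) :=
  let idx := if vm < 0 then vm + segs.length else vm
  if 0 ≤ idx ∧ idx < segs.length then segs.modify idx.toNat (· ++ xs) else segs

def pvYield : List String := ["VM_YIELD"]

-- A's for-loop over enumerate(blocks) with state (segments, dispatch_order, current_vm, current_run_blocks);
-- the trailing `if current_run_blocks > 0` of A is the [] case.  The inner `for instr in block` append loop
-- is one pvExtend by the whole block (appending each element in order = extending).
def pvALoop (assignments : List (Int × Int)) :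
    List (Int × List (List String)) → List (List (List String)) → List (Int × Int) → Int → Int →
    List (List (List String)) × List (Int × Int)
  | [], segs, disp, cv, r =>
      if r > 0 then (pvExtend segs cv [pvYield], disp ++ [(cv, r)]) else (segs, disp)
  | (i, b) :: rest, segs, disp, cv, r =>
      let vm := pvGet assignments i
      if vm ≠ cv then
        pvALoop assignments rest (pvExtend (pvExtend segs cv [pvYield]) vm b) (disp ++ [(cv, r)]) vm 1
      else
        pvALoop assignments rest (pvExtend segs vm b) disp cv (r + 1)

def build_segments_with_transfers_py (blocks : List (List (List String))) (assignments : List (Int × Int)) (n_vms : Int) (rng : Int) : List (List (List String)) × (List (Int × Int)) :=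
  pvALoop assignments (PySem.List.enumerate blocks)
    (List.replicate n_vms.toNat []) [] (pvGet assignments 0) 0

-- ===== PORT B =====
-- Phase 1 of Source B: group consecutive enumerated blocks into (vm, run) runs
-- (Source B appends to the last run front-to-back; this recursion builds the same list from the back).
def pvRuns (assignments : List (Int × Int)) :
    List (Int × List (List String)) → List (Int × List (List (List String)))
  | [] => []
  | (i, b) :: t =>
      let vm := pvGet assignments i
      match pvRuns assignments t with
      | [] => [(vm, [b])]
      | (v, bs) :: rest => if vm = v then (vm, b :: bs) :: rest else (vm, [b]) :: (v, bs) :: rest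

-- Phase 2 of Source B: per run, extend segments[vm] by every block then the yield, and append one dispatch entry.
def pvBLoop : List (Int × List (List (List String))) → List (List (List String)) → List (Int × Int) →
    List (List (List String)) × List (Int × Int)
  | [], segs, disp => (segs, disp)
  | (vm, run) :: rest, segs, disp =>
      pvBLoop rest (pvExtend segs vm (run.flatMap id ++ [pvYield])) (disp ++ [(vm, (run.length : Int))])

def build_segments_with_transfers_py_alt (blocks : List (List (List String))) (assignments : List (Int × Int)) (n_vms : Int) (rng : Int) : List (List (List String)) × (List (Int × Int)) :=
  pvBLoop (pvRuns assignments (PySem.List.enumerate blocks)) (List.replicate n_vms.toNat []) []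

-- ===== PRECONDITION & SPEC =====
-- Pre_ excludes exactly the inputs where Python A raises IndexError: some block's VM assignment
-- is outside the valid (wraparound-inclusive) index range [-n_vms, n_vms) of the segments list.
def Pre_build_segments_with_transfers_py (blocks : List (List (List String))) (assignments : List (Int × Int)) (n_vms : Int) (rng : Int) : Prop :=
  ∀ i ∈ List.range blocks.length,
    -n_vms ≤ pvGet assignments (i : Int) ∧ pvGet assignments (i : Int) < n_vms
instance (blocks : List (List (List String))) (assignments : List (Int × Int)) (n_vms : Int) (rng : Int) : Decidable (Pre_build_segments_with_transfers_py blocks assignments n_vms rng) := by unfold Pre_build_segments_with_transfers_py; infer_instance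

def pvWitness_build_segments_with_transfers_py : List (List (List String)) × (List (Int × Int)) × Int × Int :=
  ([[["PUSH 1"], ["POP"]], [["ADD"]]], [((0 : Int), (0 : Int)), ((1 : Int), (1 : Int))], 2, 0)

def Spec_build_segments_with_transfers_py (blocks : List (List (List String))) (assignments : List (Int × Int)) (n_vms : Int) (rng : Int) (out : List (List (List String)) × (List (Int × Int))) : Prop := out = build_segments_with_transfers_py_alt blocks assignments n_vms rng
instance (blocks : List (List (List String))) (assignments : List (Int × Int)) (n_vms : Int) (rng : Int) (out : List (List (List String)) × (List (Int × Int))) : Decidable (Spec_build_segments_with_transfers_py blocks assignments n_vms rng out) := by unfold Spec_build_segments_with_transfers_py; infer_instance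

-- ===== CLAIM (what is proved, stated in full; the proofs are below) =====
def Claim_equal_build_segments_with_transfers_py : Prop := ∀ (blocks : List (List (List String))) (assignments : List (Int × Int)) (n_vms : Int) (rng : Int), Dom_build_segments_with_transfers_py blocks assignments n_vms rng → Pre_build_segments_with_transfers_py blocks assignments n_vms rng → Spec_build_segments_with_transfers_py blocks assignments n_vms rng (build_segments_with_transfers_py blocks assignments n_vms rng)

-- ===== LEMMAS AND PROOFS =====

theorem pvWitness_ok :
    Dom_build_segments_with_transfers_py (pvWitness_build_segments_with_transfers_py.1) (pvWitness_build_segments_with_transfers_py.2.1) (pvWitness_build_segments_with_transfers_py.2.2.1) (pvWitness_build_segments_with_transfers_py.2.2.2) ∧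
    Pre_build_segments_with_transfers_py (pvWitness_build_segments_with_transfers_py.1) (pvWitness_build_segments_with_transfers_py.2.1) (pvWitness_build_segments_with_transfers_py.2.2.1) (pvWitness_build_segments_with_transfers_py.2.2.2) := by
  decide

theorem pvExtend_pvExtend (s : List (List (List String))) (v : Int) (xs ys : List (List String)) :
    pvExtend (pvExtend s v xs) v ys = pvExtend s v (xs ++ ys) := by
  unfold pvExtend
  have hlen : ∀ (c : Prop) [Decidable c] (t : List (List (List String))) (i : Nat)
      (f : List (List String) → List (List String)),
      (if c then List.modify t i f else t).length = t.length := by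
    intro c _ t i f; split <;> simp
  simp only [hlen]
  by_cases h : 0 ≤ (if v < 0 then v + (s.length : Int) else v) ∧
      (if v < 0 then v + (s.length : Int) else v) < (s.length : Int)
  · rw [if_pos h, if_pos h, if_pos h, List.modify_modify_eq]
    congr 1
    funext x
    simp
  · rw [if_neg h, if_neg h, if_neg h]

theorem pvALoop_eq (assignments : List (Int × Int)) (l : List (Int × List (List String)))
    (segs : List (List (List String))) (disp : List (Int × Int)) (cv r : Int) (hr : 0 ≤ r) :
    pvALoop assignments l segs disp cv r =
      match pvRuns assignments l with
      | [] => if r > 0 then (pvExtend segs cv [pvYield], disp ++ [(cv, r)]) else (segs, disp)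
      | (v, bs) :: rest =>
        if v = cv then
          pvBLoop rest (pvExtend segs cv (bs.flatMap id ++ [pvYield])) (disp ++ [(cv, r + bs.length)])
        else
          pvBLoop ((v, bs) :: rest) (pvExtend segs cv [pvYield]) (disp ++ [(cv, r)]) := by
  induction l generalizing segs disp cv r with
  | nil => rfl
  | cons p t ih =>
    obtain ⟨i, b⟩ := p
    simp only [pvALoop, pvRuns]
    by_cases hvc : pvGet assignments i = cv
    · -- no transition
      rw [ih (pvExtend segs (pvGet assignments i) b) disp cv (r + 1) (by omega)]
      cases hrt : pvRuns assignments t with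
      | nil =>
        simp [hvc, pvBLoop, pvExtend_pvExtend, show r + 1 > 0 by omega]
      | cons q rest =>
        obtain ⟨v', bs⟩ := q
        by_cases hv' : v' = cv
        · subst hv'
          simp [hvc, pvBLoop, pvExtend_pvExtend, List.append_assoc]
          rw [show r + 1 + (bs.length : Int) = r + ((bs.length : Int) + 1) by ring]
        · simp [hvc, hv', show ¬(cv = v') from fun h => hv' h.symm,
            pvBLoop, pvExtend_pvExtend, List.append_assoc]
    · -- transition: yield + dispatch for cv, then fresh run for the new vm
      rw [ih (pvExtend (pvExtend segs cv [pvYield]) (pvGet assignments i) b)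
            (disp ++ [(cv, r)]) (pvGet assignments i) 1 (by omega)]
      cases hrt : pvRuns assignments t with
      | nil =>
        simp [hvc, pvBLoop, pvExtend_pvExtend]
      | cons q rest =>
        obtain ⟨v', bs⟩ := q
        by_cases hv' : pvGet assignments i = v'
        · subst hv'
          simp [hvc, pvBLoop, pvExtend_pvExtend, List.append_assoc]
          rw [show (1 : Int) + (bs.length : Int) = (bs.length : Int) + 1 by ring]
        · simp [hvc, hv', show ¬(v' = pvGet assignments i) from fun h => hv' h.symm,
            pvBLoop, pvExtend_pvExtend, List.append_assoc]
  termination_by l.length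

theorem pvRuns_cons_head (assignments : List (Int × Int)) (i : Int) (b : List (List String))
    (t : List (Int × List (List String))) :
    ∃ bs rest, pvRuns assignments ((i, b) :: t) = (pvGet assignments i, bs) :: rest := by
  simp only [pvRuns]
  cases pvRuns assignments t with
  | nil => exact ⟨[b], [], rfl⟩
  | cons q rest =>
    obtain ⟨v', bs⟩ := q
    by_cases h : pvGet assignments i = v'
    · exact ⟨b :: bs, rest, by simp [h]⟩
    · exact ⟨[b], (v', bs) :: rest, by simp [h]⟩

-- ===== VERDICT (by name: the statement is the Claim_ definition above) =====
theorem build_segments_with_transfers_py_spec : Claim_equal_build_segments_with_transfers_py := by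
  intro blocks assignments n_vms rng _ _
  unfold Spec_build_segments_with_transfers_py
  unfold build_segments_with_transfers_py build_segments_with_transfers_py_alt
  cases blocks with
  | nil => rfl
  | cons b t =>
    rw [PySem.List.enumerate_cons]
    rw [pvALoop_eq _ _ _ _ _ _ le_rfl]
    obtain ⟨bs, rest, hruns⟩ :=
      pvRuns_cons_head assignments 0 b (PySem.List.enumerate t (0 + 1))
    rw [hruns]
    simp [pvBLoop]
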